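-- pv_equiv track=rewrite | github.com/sykurtyppi/PIVOT_QUANT | scripts/generate_daily_ml_report.py | compute_regime_summary
-- ===== SOURCE A (Python) =====
-- from typing import Any
--
-- def compute_regime_summary(predictions: list[dict[str, Any]]) -> dict[str, int]:
--     summary = {
--         "rv_low": 0,
--         "rv_normal": 0,
--         "rv_high": 0,
--         "trend_up": 0,
--         "trend_down": 0,
--         "range": 0,
--         "vol_expansion": 0,
--         "unknown": 0,
--     }
--     for row in predictions:
--         rv = row.get("rv_regime")
--         if rv == 1:
--             summary["rv_low"] += 1
--         elif rv == 2:
--             summary["rv_normal"] += 1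
--         elif rv == 3:
--             summary["rv_high"] += 1
--         else:
--             summary["unknown"] += 1
--
--         regime = row.get("regime_type")
--         if regime == 1:
--             summary["trend_up"] += 1
--         elif regime == 2:
--             summary["trend_down"] += 1
--         elif regime == 3:
--             summary["range"] += 1
--         elif regime == 4:
--             summary["vol_expansion"] += 1
--     return summary
-- ===== SOURCE B (Python) =====
-- def compute_regime_summary(predictions: list) -> dict:
--     rvs = [row.get("rv_regime") for row in predictions]
--     regimes = [row.get("regime_type") for row in predictions]
--     return {
--         "rv_low": rvs.count(1),
--         "rv_normal": rvs.count(2),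
--         "rv_high": rvs.count(3),
--         "trend_up": regimes.count(1),
--         "trend_down": regimes.count(2),
--         "range": regimes.count(3),
--         "vol_expansion": regimes.count(4),
--         "unknown": len(predictions) - rvs.count(1) - rvs.count(2) - rvs.count(3),
--     }
-- ===== Notes on version B (the rewrite author's own statement) =====
-- stated objective: simpler
-- what changed: Replaces the single loop of branch-and-increment dict updates with two projection lists and direct .count lookups per bucket, computing 'unknown' by subtraction from the total.
import Mathlib
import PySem

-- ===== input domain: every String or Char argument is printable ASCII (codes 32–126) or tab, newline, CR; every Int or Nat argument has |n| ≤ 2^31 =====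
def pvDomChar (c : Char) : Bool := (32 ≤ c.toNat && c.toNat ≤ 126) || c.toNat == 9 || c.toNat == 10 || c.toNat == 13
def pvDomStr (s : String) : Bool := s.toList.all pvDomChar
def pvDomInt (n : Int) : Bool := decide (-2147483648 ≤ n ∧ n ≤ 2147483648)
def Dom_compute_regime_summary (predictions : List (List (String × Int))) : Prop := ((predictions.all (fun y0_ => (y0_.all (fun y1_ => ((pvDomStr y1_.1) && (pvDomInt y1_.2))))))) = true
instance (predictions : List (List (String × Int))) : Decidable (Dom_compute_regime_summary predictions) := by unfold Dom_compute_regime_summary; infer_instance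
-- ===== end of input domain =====

-- B replaces the branch-and-increment loop by per-bucket `.count` on the two projected
-- value lists, with `unknown` obtained by subtraction from the total (objective: simpler).

-- ===== PORT A =====
def pvStepA (s : PySem.Dict String Int) (row : List (String × Int)) : PySem.Dict String Int :=
  let rv := (PySem.Dict.mk row).get? "rv_regime"
  let s :=
    if rv = some 1 then s.modify "rv_low" 0 (· + 1)
    else if rv = some 2 then s.modify "rv_normal" 0 (· + 1)
    else if rv = some 3 then s.modify "rv_high" 0 (· + 1)
    else s.modify "unknown" 0 (· + 1)
  let regime := (PySem.Dict.mk row).get? "regime_type"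
  if regime = some 1 then s.modify "trend_up" 0 (· + 1)
  else if regime = some 2 then s.modify "trend_down" 0 (· + 1)
  else if regime = some 3 then s.modify "range" 0 (· + 1)
  else if regime = some 4 then s.modify "vol_expansion" 0 (· + 1)
  else s

def compute_regime_summary (predictions : List (List (String × Int))) : List (String × Int) :=
  let summary : PySem.Dict String Int := PySem.Dict.mk
    [("rv_low", 0), ("rv_normal", 0), ("rv_high", 0), ("trend_up", 0),
     ("trend_down", 0), ("range", 0), ("vol_expansion", 0), ("unknown", 0)]
  (predictions.foldl pvStepA summary).items

-- ===== PORT B =====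
def compute_regime_summary_alt (predictions : List (List (String × Int))) : List (String × Int) :=
  let rvs := predictions.map (fun row => (PySem.Dict.mk row).get? "rv_regime")
  let regimes := predictions.map (fun row => (PySem.Dict.mk row).get? "regime_type")
  [("rv_low", (rvs.count (some 1) : Int)),
   ("rv_normal", (rvs.count (some 2) : Int)),
   ("rv_high", (rvs.count (some 3) : Int)),
   ("trend_up", (regimes.count (some 1) : Int)),
   ("trend_down", (regimes.count (some 2) : Int)),
   ("range", (regimes.count (some 3) : Int)),
   ("vol_expansion", (regimes.count (some 4) : Int)),
   ("unknown", (predictions.length : Int) - rvs.count (some 1) - rvs.count (some 2) - rvs.count (some 3))]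

-- ===== PRECONDITION & SPEC =====
def Spec_compute_regime_summary (predictions : List (List (String × Int))) (out : List (String × Int)) : Prop := out = compute_regime_summary_alt predictions
instance (predictions : List (List (String × Int))) (out : List (String × Int)) : Decidable (Spec_compute_regime_summary predictions out) := by unfold Spec_compute_regime_summary; infer_instance

-- ===== CLAIM (what is proved, stated in full; the proofs are below) =====
def Claim_equal_compute_regime_summary : Prop := ∀ (predictions : List (List (String × Int))), Dom_compute_regime_summary predictions → Spec_compute_regime_summary predictions (compute_regime_summary predictions)

-- ===== LEMMAS AND PROOFS =====

def pvMk (a b c d e f g h : Int) : PySem.Dict String Int := PySem.Dict.mk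
  [("rv_low", a), ("rv_normal", b), ("rv_high", c), ("trend_up", d),
   ("trend_down", e), ("range", f), ("vol_expansion", g), ("unknown", h)]

def pvRv (row : List (String × Int)) : Option Int := (PySem.Dict.mk row).get? "rv_regime"
def pvRg (row : List (String × Int)) : Option Int := (PySem.Dict.mk row).get? "regime_type"

theorem pvMod1 (a b c d e f g h : Int) : (pvMk a b c d e f g h).modify "rv_low" 0 (· + 1) = pvMk (a+1) b c d e f g h := rfl
theorem pvMod2 (a b c d e f g h : Int) : (pvMk a b c d e f g h).modify "rv_normal" 0 (· + 1) = pvMk a (b+1) c d e f g h := rfl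
theorem pvMod3 (a b c d e f g h : Int) : (pvMk a b c d e f g h).modify "rv_high" 0 (· + 1) = pvMk a b (c+1) d e f g h := rfl
theorem pvMod4 (a b c d e f g h : Int) : (pvMk a b c d e f g h).modify "trend_up" 0 (· + 1) = pvMk a b c (d+1) e f g h := rfl
theorem pvMod5 (a b c d e f g h : Int) : (pvMk a b c d e f g h).modify "trend_down" 0 (· + 1) = pvMk a b c d (e+1) f g h := rfl
theorem pvMod6 (a b c d e f g h : Int) : (pvMk a b c d e f g h).modify "range" 0 (· + 1) = pvMk a b c d e (f+1) g h := rfl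
theorem pvMod7 (a b c d e f g h : Int) : (pvMk a b c d e f g h).modify "vol_expansion" 0 (· + 1) = pvMk a b c d e f (g+1) h := rfl
theorem pvMod8 (a b c d e f g h : Int) : (pvMk a b c d e f g h).modify "unknown" 0 (· + 1) = pvMk a b c d e f g (h+1) := rfl

theorem pvStep_eq (r : List (String × Int)) (a b c d e f g h : Int) :
    pvStepA (pvMk a b c d e f g h) r =
      pvMk (a + if pvRv r = some 1 then 1 else 0)
           (b + if pvRv r = some 2 then 1 else 0)
           (c + if pvRv r = some 3 then 1 else 0)
           (d + if pvRg r = some 1 then 1 else 0)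
           (e + if pvRg r = some 2 then 1 else 0)
           (f + if pvRg r = some 3 then 1 else 0)
           (g + if pvRg r = some 4 then 1 else 0)
           (h + if pvRv r = some 1 then 0 else if pvRv r = some 2 then 0 else if pvRv r = some 3 then 0 else 1) := by
  show (let s := if pvRv r = some 1 then (pvMk a b c d e f g h).modify "rv_low" 0 (· + 1)
                 else if pvRv r = some 2 then (pvMk a b c d e f g h).modify "rv_normal" 0 (· + 1)
                 else if pvRv r = some 3 then (pvMk a b c d e f g h).modify "rv_high" 0 (· + 1)
                 else (pvMk a b c d e f g h).modify "unknown" 0 (· + 1);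
        if pvRg r = some 1 then s.modify "trend_up" 0 (· + 1)
        else if pvRg r = some 2 then s.modify "trend_down" 0 (· + 1)
        else if pvRg r = some 3 then s.modify "range" 0 (· + 1)
        else if pvRg r = some 4 then s.modify "vol_expansion" 0 (· + 1)
        else s) = _
  split_ifs <;>
    simp only [pvMod1, pvMod2, pvMod3, pvMod4, pvMod5, pvMod6, pvMod7, pvMod8, add_zero] <;>
    simp_all

theorem pv_comp (a : Int) (x : Option Int) (v : Int) (n : Nat) :
    a + (if x = some v then (1:Int) else 0) + (n : Int) =
      a + ((n + if x == some v then 1 else 0 : Nat) : Int) := by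
  by_cases h : x = some v <;> simp [h] <;> push_cast <;> omega

theorem pv_unk (a : Int) (x : Option Int) (n : Nat) :
    a + (if x = some 1 then (0:Int) else if x = some 2 then 0 else if x = some 3 then 0 else 1) + (n : Int) =
      a + ((n + if (!(x == some 1 || x == some 2 || x == some 3)) = true then 1 else 0 : Nat) : Int) := by
  by_cases h1 : x = some 1 <;> by_cases h2 : x = some 2 <;> by_cases h3 : x = some 3 <;>
    simp [h1, h2, h3] <;> push_cast <;> omega

theorem pv_fold_inv (l : List (List (String × Int))) (a b c d e f g h : Int) :
    l.foldl pvStepA (pvMk a b c d e f g h) =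
      pvMk (a + (l.map pvRv).count (some 1)) (b + (l.map pvRv).count (some 2))
           (c + (l.map pvRv).count (some 3)) (d + (l.map pvRg).count (some 1))
           (e + (l.map pvRg).count (some 2)) (f + (l.map pvRg).count (some 3))
           (g + (l.map pvRg).count (some 4))
           (h + (l.countP (fun r => !(pvRv r == some 1 || pvRv r == some 2 || pvRv r == some 3)) : Int)) := by
  induction l generalizing a b c d e f g h with
  | nil => simp
  | cons r t ih =>
    rw [List.foldl_cons, pvStep_eq, ih]
    simp only [List.map_cons, List.count_cons, List.countP_cons,
      pvMk, PySem.Dict.mk.injEq, List.cons.injEq, Prod.mk.injEq, and_true, true_and]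
    refine ⟨pv_comp .., pv_comp .., pv_comp .., pv_comp .., pv_comp .., pv_comp .., pv_comp .., ?_⟩
    exact pv_unk ..

theorem pv_unknown_eq (l : List (List (String × Int))) :
    (l.countP (fun r => !(pvRv r == some 1 || pvRv r == some 2 || pvRv r == some 3)) : Int) =
      (l.length : Int) - (l.map pvRv).count (some 1) - (l.map pvRv).count (some 2) - (l.map pvRv).count (some 3) := by
  induction l with
  | nil => simp
  | cons r t ih =>
    simp only [List.countP_cons, List.map_cons, List.count_cons, List.length_cons]
    by_cases h1 : pvRv r = some 1 <;> by_cases h2 : pvRv r = some 2 <;> by_cases h3 : pvRv r = some 3 <;>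
      simp_all <;> push_cast <;> omega

-- ===== VERDICT (by name: the statement is the Claim_ definition above) =====
theorem compute_regime_summary_spec : Claim_equal_compute_regime_summary := by
  intro predictions _
  show (List.foldl pvStepA (pvMk 0 0 0 0 0 0 0 0) predictions).items = compute_regime_summary_alt predictions
  rw [pv_fold_inv]
  simp only [zero_add, pvMk]
  rw [pv_unknown_eq]
  rfl
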